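-- pv_equiv track=rewrite | github.com/Exclamation1/Covering-Code | matrix_method_cover.py | build_H_I_M
-- ===== SOURCE A (Python) =====
-- def build_H_I_M(m: int, M_cols: list[int]):
--     # H = [I_m | M], with columns in MSB-first convention
--     # For export like Table 2: we print M as 'm rows' of hex (each row length = k bits)
--     k = len(M_cols)
--     # make row-wise bits for M
--     M_rows = []
--     for i in range(m):  # row i = i-th bit of each col (MSB-first)
--         row_bits = []
--         for c in M_cols:
--             bit = (c >> (m-1-i)) & 1
--             row_bits.append(bit)
--         M_rows.append(row_bits)
--     return M_rows  # list of length m, each row is list of k bits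
-- ===== SOURCE B (Python) =====
-- def build_H_I_M(m: int, M_cols: list[int]):
--     # column-major first, then transpose via zip (empty-columns case handled explicitly)
--     col_list = [[(c >> (m - 1 - i)) & 1 for i in range(m)] for c in M_cols]
--     if not M_cols:
--         return [[] for _ in range(m)]
--     return [list(r) for r in zip(*col_list)]
-- ===== Notes on version B (the rewrite author's own statement) =====
-- stated objective: alternative
-- what changed: B builds the bit matrix column-major (one m-bit MSB-first list per column) and obtains the rows by transposing with zip, with the empty-column-list case handled explicitly, instead of A's row-major nested loops.
import Mathlib
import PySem

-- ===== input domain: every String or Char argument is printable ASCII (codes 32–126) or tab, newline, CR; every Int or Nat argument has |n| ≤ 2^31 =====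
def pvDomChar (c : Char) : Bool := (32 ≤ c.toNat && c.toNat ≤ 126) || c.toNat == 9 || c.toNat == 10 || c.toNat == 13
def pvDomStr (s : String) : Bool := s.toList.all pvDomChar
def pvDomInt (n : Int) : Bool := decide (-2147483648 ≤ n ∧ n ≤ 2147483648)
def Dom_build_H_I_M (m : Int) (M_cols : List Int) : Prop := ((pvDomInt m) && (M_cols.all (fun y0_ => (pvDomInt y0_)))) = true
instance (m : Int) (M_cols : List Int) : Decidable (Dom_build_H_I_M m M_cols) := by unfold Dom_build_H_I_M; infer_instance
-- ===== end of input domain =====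

-- B builds the bit matrix column-major and transposes with zip (explicit empty case),
-- instead of A's row-major nested loops; same cost, different decomposition.

-- ===== PORT A =====
-- literal port of A: outer loop over rows i, inner loop over columns c, appending bits
def build_H_I_M (m : Int) (M_cols : List Int) : List (List Int) :=
  let _k := M_cols.length
  (PySem.List.pyRange 0 m 1).foldl
    (fun M_rows i =>
      M_rows ++ [M_cols.foldl (fun row_bits (c : Int) => row_bits ++ [Int.land (c >>> (m - 1 - i).toNat) 1]) []])
    []

-- ===== PORT B =====
-- zip(*col_list): truncating transpose, fuel = length of the first column
def pvZipT : Nat → List (List Int) → List (List Int)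
  | 0, _ => []
  | n + 1, cols =>
    if cols.any List.isEmpty then []
    else (cols.map (fun l => l.headD 0)) :: pvZipT n (cols.map List.tail)

def build_H_I_M_alt (m : Int) (M_cols : List Int) : List (List Int) :=
  let col_list := M_cols.map (fun (c : Int) => (PySem.List.pyRange 0 m 1).map (fun i => Int.land (c >>> (m - 1 - i).toNat) 1))
  if M_cols.isEmpty then (PySem.List.pyRange 0 m 1).map (fun _ => [])
  else pvZipT (col_list.headD []).length col_list

-- ===== PRECONDITION & SPEC =====
def Spec_build_H_I_M (m : Int) (M_cols : List Int) (out : List (List Int)) : Prop := out = build_H_I_M_alt m M_cols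
instance (m : Int) (M_cols : List Int) (out : List (List Int)) : Decidable (Spec_build_H_I_M m M_cols out) := by unfold Spec_build_H_I_M; infer_instance

-- ===== CLAIM (what is proved, stated in full; the proofs are below) =====
def Claim_equal_build_H_I_M : Prop := ∀ (m : Int) (M_cols : List Int), Dom_build_H_I_M m M_cols → Spec_build_H_I_M m M_cols (build_H_I_M m M_cols)

-- ===== LEMMAS AND PROOFS =====

theorem pv_foldl_append_map {α β : Type} (g : α → β) (l : List α) (acc : List β) :
    l.foldl (fun a x => a ++ [g x]) acc = acc ++ l.map g := by
  induction l generalizing acc with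
  | nil => simp
  | cons x xs ih => simp [List.foldl, ih]

theorem pv_A_map (m : Int) (M_cols : List Int) :
    build_H_I_M m M_cols =
      (PySem.List.pyRange 0 m 1).map (fun i => M_cols.map (fun (c : Int) => Int.land (c >>> (m - 1 - i).toNat) 1)) := by
  unfold build_H_I_M
  rw [pv_foldl_append_map (fun i => M_cols.foldl (fun row_bits (c : Int) => row_bits ++ [Int.land (c >>> (m - 1 - i).toNat) 1]) [])]
  simp only [List.nil_append]
  refine List.map_congr_left (fun i _ => ?_)
  rw [pv_foldl_append_map]
  simp

theorem pv_zipT_cols {cols : List Int} (f : Int -> Int -> Int) (I : List Int) (h : cols ≠ []) :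
    pvZipT I.length (cols.map (fun c => I.map (fun i => f i c))) =
      I.map (fun i => cols.map (f i)) := by
  induction I generalizing cols with
  | nil => simp [pvZipT]
  | cons i I' ih =>
    simp only [List.length_cons, pvZipT]
    have hany : (cols.map (fun c => (i :: I').map (fun j => f j c))).any List.isEmpty = false := by
      simp [List.any_map, Function.comp, List.isEmpty]
    rw [hany]
    simp only [Bool.false_eq_true, if_false, List.map_cons]
    congr 1
    · simp [List.map_map, Function.comp]
    · rw [List.map_map]
      simp only [Function.comp_def, List.tail_cons]
      exact ih h

-- ===== VERDICT (by name: the statement is the Claim_ definition above) =====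
theorem build_H_I_M_spec : Claim_equal_build_H_I_M := by
  intro m M_cols _
  unfold Spec_build_H_I_M
  rw [pv_A_map]
  unfold build_H_I_M_alt
  cases M_cols with
  | nil => simp
  | cons c0 cs =>
    simp only [List.isEmpty_cons, Bool.false_eq_true, if_false]
    rw [show (((c0 :: cs).map (fun (c : Int) => (PySem.List.pyRange 0 m 1).map (fun i => Int.land (c >>> (m - 1 - i).toNat) 1))).headD []).length
          = (PySem.List.pyRange 0 m 1).length by simp]
    exact (pv_zipT_cols (fun i c => Int.land (c >>> (m - 1 - i).toNat) 1) (PySem.List.pyRange 0 m 1) (by simp)).symm
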